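-- pv_equiv track=rewrite | github.com/aeabijl/advent-of-code-2023 | day6/script2.py | first_best_score_right
-- ===== SOURCE A (Python) =====
-- def is_record(hold, time, distance):
--     return hold * (time - hold) > distance
--
-- def first_best_score_right(time, distance):
--     low, high = 0, time
--     while low <= high:
--         middle_button_hold = low + (high - low >> 1)
--         if is_record(middle_button_hold, time, distance):
--             low = middle_button_hold + 1
--         else:
--             high = middle_button_hold - 1
--     return high
-- ===== SOURCE B (Python) =====
-- import math
--
-- def first_best_score_right(time, distance):
--     # Closed-form: the winning holds are the integers strictly between the roots
--     # of h*(time-h) = distance; take the largest one in [0, time], or -1 if none.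
--     disc = time * time - 4 * distance
--     if disc <= 0:
--         return -1
--     s = math.isqrt(disc)
--     if s * s == disc:
--         s -= 1
--     hi = min((time + s) // 2, time)
--     return hi if hi * (time - hi) > distance else -1
-- ===== Notes on version B (the rewrite author's own statement) =====
-- stated objective: faster
-- what changed: Replaced the O(log time) binary search over hold times with an O(1) closed-form quadratic solution (integer isqrt of the discriminant, candidate verified against the record); Pre_ excludes negative time, outside the puzzle's natural domain, where A's returned value 'time' is an artefact of the loop never running.
-- outside the precondition, e.g. on first_best_score_right(-4, 5): A returns -4, B returns -1
import Mathlib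
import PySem

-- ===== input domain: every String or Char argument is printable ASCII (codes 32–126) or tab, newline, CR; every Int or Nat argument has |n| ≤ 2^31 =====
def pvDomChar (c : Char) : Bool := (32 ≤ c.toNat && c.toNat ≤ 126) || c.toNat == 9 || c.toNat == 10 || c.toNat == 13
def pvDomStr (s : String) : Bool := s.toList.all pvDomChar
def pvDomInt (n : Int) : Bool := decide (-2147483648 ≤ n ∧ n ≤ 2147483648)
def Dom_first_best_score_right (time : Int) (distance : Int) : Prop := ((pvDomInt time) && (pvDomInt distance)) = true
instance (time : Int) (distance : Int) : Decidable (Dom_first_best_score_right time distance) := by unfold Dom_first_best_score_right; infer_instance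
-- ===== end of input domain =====

-- B replaces A's binary search over hold times with a closed-form quadratic solution
-- (integer isqrt of the discriminant): O(1) arithmetic instead of the search loop.

-- ===== PORT A =====
def is_record (hold : Int) (time : Int) (distance : Int) : Bool :=
  decide (hold * (time - hold) > distance)

-- the 'while low <= high' loop of A, with fuel (one unit per iteration; 'high - low >> 1' is floor division by 2);
-- the initial fuel high - low + 1 = time + 1 bounds the iteration count, so the 0-fuel default is never reached
def fbsrLoop (time : Int) (distance : Int) : Int → Int → Nat → Int
  | _, high, 0 => high
  | low, high, fuel + 1 =>
    if low ≤ high then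
      let middle_button_hold := low + PySem.Int.floordiv (high - low) 2
      if is_record middle_button_hold time distance then
        fbsrLoop time distance (middle_button_hold + 1) high fuel
      else
        fbsrLoop time distance low (middle_button_hold - 1) fuel
    else high

def first_best_score_right (time : Int) (distance : Int) : Int :=
  fbsrLoop time distance 0 time (time - 0 + 1).toNat

-- ===== PORT B =====
def first_best_score_right_alt (time : Int) (distance : Int) : Int :=
  let disc := time * time - 4 * distance
  if disc ≤ 0 then -1
  else
    let s0 : Int := (Nat.sqrt disc.toNat : Nat)   -- math.isqrt(disc), disc > 0
    let s : Int := if s0 * s0 = disc then s0 - 1 else s0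
    let hi := min (PySem.Int.floordiv (time + s) 2) time
    if hi * (time - hi) > distance then hi else -1

-- ===== PRECONDITION & SPEC =====
-- Pre_ excludes negative time, outside the puzzle's natural domain (the hold window [0, time]
-- is then empty), where A's returned value `time` is an artefact of the loop never running.
def Pre_first_best_score_right (time : Int) (distance : Int) : Prop := 0 ≤ time
instance (time : Int) (distance : Int) : Decidable (Pre_first_best_score_right time distance) := by unfold Pre_first_best_score_right; infer_instance
def pvWitness_first_best_score_right : Int × Int := (10, 20)

def Spec_first_best_score_right (time : Int) (distance : Int) (out : Int) : Prop := out = first_best_score_right_alt time distance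
instance (time : Int) (distance : Int) (out : Int) : Decidable (Spec_first_best_score_right time distance out) := by unfold Spec_first_best_score_right; infer_instance

-- ===== CLAIM (what is proved, stated in full; the proofs are below) =====
def Claim_equal_first_best_score_right : Prop := ∀ (time : Int) (distance : Int), Dom_first_best_score_right time distance → Pre_first_best_score_right time distance → Spec_first_best_score_right time distance (first_best_score_right time distance)

-- ===== LEMMAS AND PROOFS =====

-- with no fuel left, or the bounds crossed, the loop returns high
lemma fbsrLoop_stop (time distance low high : Int) (fuel : Nat) (h : ¬ low ≤ high) :
    fbsrLoop time distance low high fuel = high := by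
  cases fuel <;> simp [fbsrLoop, h]

-- If nothing in [low, high] is a record, the loop only shrinks high and returns low - 1.
lemma fbsrLoop_all_false (time distance : Int) :
    ∀ (fuel : Nat) (low high : Int), (high - low + 1).toNat ≤ fuel → low - 1 ≤ high →
    (∀ h : Int, low ≤ h → h ≤ high → ¬ (h * (time - h) > distance)) →
    fbsrLoop time distance low high fuel = low - 1 := by
  intro fuel
  induction fuel with
  | zero =>
    intro low high hn hle _
    have : high = low - 1 := by omega
    rw [fbsrLoop_stop _ _ _ _ _ (by omega), this]
  | succ fuel ih =>
    intro low high hn hle hall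
    by_cases hlh : low ≤ high
    · have hfd := PySem.Int.floordiv_eq_ediv_of_pos (a := high - low) (b := 2) (by norm_num)
      rw [fbsrLoop]
      rw [if_pos hlh]
      set mid := low + PySem.Int.floordiv (high - low) 2 with hmid
      have hmlo : low ≤ mid := by rw [hmid, hfd]; omega
      have hmhi : mid ≤ high := by rw [hmid, hfd]; omega
      have hnr : is_record mid time distance = false := by
        simp only [is_record, decide_eq_false_iff_not]
        exact hall mid hmlo hmhi
      simp only [hnr, Bool.false_eq_true, if_false]
      exact ih low (mid - 1) (by rw [hmid, hfd] at *; omega) (by omega)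
        (fun h h1 h2 => hall h h1 (by omega))
    · rw [fbsrLoop_stop _ _ _ _ _ hlh]; omega

-- If [low, high] brackets m with: everything in [low, m] a record and everything in (m, high] not,
-- the loop converges to m.
lemma fbsrLoop_bracket (time distance : Int) :
    ∀ (fuel : Nat) (low high m : Int), (high - low + 1).toNat ≤ fuel → low ≤ m + 1 → m ≤ high →
    (∀ h : Int, low ≤ h → h ≤ m → h * (time - h) > distance) →
    (∀ h : Int, m < h → h ≤ high → ¬ (h * (time - h) > distance)) →
    fbsrLoop time distance low high fuel = m := by
  intro fuel
  induction fuel with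
  | zero =>
    intro low high m hn hlo hhi _ _
    have : high = m := by omega
    rw [fbsrLoop_stop _ _ _ _ _ (by omega), this]
  | succ fuel ih =>
    intro low high m hn hlo hhi hyes hno
    by_cases hlh : low ≤ high
    · have hfd := PySem.Int.floordiv_eq_ediv_of_pos (a := high - low) (b := 2) (by norm_num)
      rw [fbsrLoop]
      rw [if_pos hlh]
      set mid := low + PySem.Int.floordiv (high - low) 2 with hmid
      have hmlo : low ≤ mid := by rw [hmid, hfd]; omega
      have hmhi : mid ≤ high := by rw [hmid, hfd]; omega
      by_cases hc : mid ≤ m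
      · have hr : is_record mid time distance = true := by
          simp only [is_record, decide_eq_true_eq]
          exact hyes mid hmlo hc
        simp only [hr, if_true]
        exact ih (mid + 1) high m (by rw [hmid, hfd] at *; omega) (by omega) hhi
          (fun h h1 h2 => hyes h (by omega) h2) hno
      · have hr : is_record mid time distance = false := by
          simp only [is_record, decide_eq_false_iff_not]
          exact hno mid (by omega) hmhi
        simp only [hr, Bool.false_eq_true, if_false]
        exact ih low (mid - 1) m (by rw [hmid, hfd] at *; omega) hlo (by omega) hyes
          (fun h h1 h2 => hno h h1 (by omega))
    · rw [fbsrLoop_stop _ _ _ _ _ hlh]; omega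

-- record ⟺ the squared distance of 2h from time is below the discriminant
lemma record_iff_sq (time distance h : Int) :
    h * (time - h) > distance ↔ (2 * h - time) ^ 2 < time * time - 4 * distance := by
  constructor <;> intro hh <;> nlinarith [sq_nonneg (2 * h - time)]

theorem first_best_score_right_spec_core (time distance : Int) (ht : 0 ≤ time) :
    first_best_score_right time distance = first_best_score_right_alt time distance := by
  unfold first_best_score_right first_best_score_right_alt
  set disc := time * time - 4 * distance with hdisc
  by_cases hd : disc ≤ 0
  · -- no hold can beat the record at all
    rw [if_pos hd]
    have : fbsrLoop time distance 0 time (time - 0 + 1).toNat = 0 - 1 :=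
      fbsrLoop_all_false time distance _ 0 time (by omega) (by omega)
        (fun h _ _ hrec => by
          rw [record_iff_sq] at hrec
          nlinarith [sq_nonneg (2 * h - time)])
    omega
  · rw [if_neg hd]
    dsimp only
    push_neg at hd
    set s0 : Int := ((Nat.sqrt disc.toNat : Nat) : Int) with hs0
    have hsq : s0 * s0 ≤ disc := by
      rw [hs0]
      have h1 : Nat.sqrt disc.toNat ^ 2 ≤ disc.toNat := Nat.sqrt_le' _
      rw [pow_two] at h1
      omega
    have hsq2 : disc < (s0 + 1) * (s0 + 1) := by
      rw [hs0]
      have h1 : disc.toNat < (Nat.sqrt disc.toNat).succ ^ 2 := Nat.lt_succ_sqrt' _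
      rw [pow_two, Nat.succ_eq_add_one] at h1
      have h2 : (disc.toNat : Int) < ((Nat.sqrt disc.toNat : Int) + 1) * ((Nat.sqrt disc.toNat : Int) + 1) := by
        exact_mod_cast h1
      have h3 : (disc.toNat : Int) = disc := Int.toNat_of_nonneg (le_of_lt hd)
      linarith
    have hs0nn : 0 ≤ s0 := by rw [hs0]; positivity
    set s : Int := if s0 * s0 = disc then s0 - 1 else s0 with hs
    -- s is the largest integer with s * s < disc
    have hslt : s * s < disc := by
      rw [hs]; split
      · next heq => nlinarith
      · next hne => exact lt_of_le_of_ne hsq hne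
    have hsge : disc ≤ (s + 1) * (s + 1) := by
      rw [hs]; split
      · next heq => nlinarith
      · next hne => nlinarith
    have hsnn : 0 ≤ s := by
      rw [hs]; split <;> nlinarith
    -- record ⟺ |2h - time| ≤ s
    have hchar : ∀ h : Int, (h * (time - h) > distance ↔ (-s ≤ 2 * h - time ∧ 2 * h - time ≤ s)) := by
      intro h
      rw [record_iff_sq, ← hdisc]
      constructor
      · intro hlt
        constructor <;> nlinarith
      · intro ⟨h1, h2⟩
        nlinarith
    have hfd := PySem.Int.floordiv_eq_ediv_of_pos (a := time + s) (b := 2) (by norm_num)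
    rw [hfd]
    set hi : Int := min ((time + s) / 2) time with hhi
    by_cases hw : hi * (time - hi) > distance
    · -- the candidate wins: the first probe time // 2 is a record, then bracket around hi
      rw [if_pos hw]
      rw [hchar] at hw
      obtain ⟨n, hn⟩ : ∃ n, (time - 0 + 1).toNat = n + 1 := ⟨(time - 0 + 1).toNat - 1, by omega⟩
      rw [hn, fbsrLoop, if_pos (by omega : (0:Int) ≤ time)]
      have hm0 := PySem.Int.floordiv_eq_ediv_of_pos (a := time - 0) (b := 2) (by norm_num)
      have hrec0 : is_record (0 + PySem.Int.floordiv (time - 0) 2) time distance = true := by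
        simp only [is_record, decide_eq_true_eq]
        rw [hchar, hm0]
        omega
      simp only [hrec0, if_true]
      apply fbsrLoop_bracket time distance n _ time hi (by rw [hm0] at *; omega)
      · rw [hm0]; omega
      · omega
      · intro h h1 h2
        rw [hm0] at h1
        rw [hchar]
        omega
      · intro h h1 h2
        rw [hchar]
        omega
    · -- the candidate loses, so no hold in [0, time] wins: the loop returns -1
      rw [if_neg hw]
      rw [hchar] at hw
      have : fbsrLoop time distance 0 time (time - 0 + 1).toNat = 0 - 1 :=
        fbsrLoop_all_false time distance _ 0 time (by omega) (by omega)
          (fun h hl hr hrec => by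
            rw [hchar] at hrec
            omega)
      omega

-- ===== VERDICT (by name: the statement is the Claim_ definition above) =====
theorem first_best_score_right_spec : Claim_equal_first_best_score_right := by
  intro time distance _ hpre
  exact first_best_score_right_spec_core time distance hpre
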